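-- pv_equiv track=rewrite | github.com/ViktorMaximovskiy88/Apollo_health | backend/scrapeworker/scrapers/by_domain/tricare.py | get_prefix_terms
-- ===== SOURCE A (Python) =====
-- def get_prefix_terms(search_terms, prefix_length):
--     prefix_terms = set()
--     for term in search_terms:
--         prefix_term = term[:prefix_length].lower()
--         if prefix_term in prefix_terms or len(prefix_term) < prefix_length:
--             continue
--         prefix_terms.add(prefix_term)
--     prefix_terms = list(prefix_terms)
--     prefix_terms.sort()
--     return prefix_terms
-- ===== SOURCE B (Python) =====
-- def get_prefix_terms(search_terms, prefix_length):
--     # sort-then-adjacent-dedup instead of a hash set with an in-loop membership guard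
--     prefixes = [term[:prefix_length].lower() for term in search_terms]
--     prefixes = [p for p in prefixes if len(p) >= prefix_length]
--     prefixes.sort()
--     out = []
--     for p in prefixes:
--         if not out or out[-1] != p:
--             out.append(p)
--     return out
-- ===== Notes on version B (the rewrite author's own statement) =====
-- stated objective: alternative
-- what changed: Replaces the hash set with per-item membership test by a map+filter list of all qualifying prefixes, a sort of the full list, and one linear adjacent-duplicate-removal pass.
import Mathlib
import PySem

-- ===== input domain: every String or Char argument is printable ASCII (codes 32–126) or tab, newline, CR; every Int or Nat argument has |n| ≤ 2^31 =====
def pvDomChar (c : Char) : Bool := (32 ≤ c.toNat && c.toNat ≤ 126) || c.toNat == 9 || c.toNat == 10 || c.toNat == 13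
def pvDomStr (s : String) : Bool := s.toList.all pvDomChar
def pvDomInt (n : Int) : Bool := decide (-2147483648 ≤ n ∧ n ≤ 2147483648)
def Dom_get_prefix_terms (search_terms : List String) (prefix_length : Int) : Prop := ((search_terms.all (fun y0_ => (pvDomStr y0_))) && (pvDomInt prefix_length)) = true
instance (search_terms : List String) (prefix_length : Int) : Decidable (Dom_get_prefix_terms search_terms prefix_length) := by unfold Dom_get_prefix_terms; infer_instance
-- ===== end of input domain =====

-- B replaces A's hash set and in-loop membership guard with map+filter, a full sort, and one
-- adjacent-duplicate-removal pass (alternative decomposition, same asymptotic cost).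

-- ===== PORT A =====
-- faithful transliteration of A: a set built in a loop (skip on membership or short prefix), then list + sort
def get_prefix_terms (search_terms : List String) (prefix_length : Int) : List String :=
  let prefix_terms : PySem.Set String :=
    search_terms.foldl (fun s term =>
      let prefix_term := PySem.Str.lower (PySem.Str.slice term none (some prefix_length))
      if PySem.Set.contains s prefix_term || decide (PySem.Str.len prefix_term < prefix_length) then s
      else PySem.Set.add s prefix_term) PySem.Set.empty
  PySem.List.sorted prefix_terms (fun x => x)

-- ===== PORT B =====
-- transliteration of B: map to lowered prefixes, filter by length, sort, adjacent-duplicate removal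
def get_prefix_terms_alt (search_terms : List String) (prefix_length : Int) : List String :=
  let prefixes := search_terms.map (fun term => PySem.Str.lower (PySem.Str.slice term none (some prefix_length)))
  let prefixes := prefixes.filter (fun p => decide (prefix_length ≤ PySem.Str.len p))
  let prefixes := PySem.List.sorted prefixes (fun x => x)
  prefixes.foldl (fun out p => if out.getLast? = some p then out else out ++ [p]) []

-- ===== PRECONDITION & SPEC =====
def Spec_get_prefix_terms (search_terms : List String) (prefix_length : Int) (out : List String) : Prop := out = get_prefix_terms_alt search_terms prefix_length
instance (search_terms : List String) (prefix_length : Int) (out : List String) : Decidable (Spec_get_prefix_terms search_terms prefix_length out) := by unfold Spec_get_prefix_terms; infer_instance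

-- ===== CLAIM (what is proved, stated in full; the proofs are below) =====
def Claim_equal_get_prefix_terms : Prop := ∀ (search_terms : List String) (prefix_length : Int), Dom_get_prefix_terms search_terms prefix_length → Spec_get_prefix_terms search_terms prefix_length (get_prefix_terms search_terms prefix_length)

-- ===== LEMMAS AND PROOFS =====

-- A's loop body (skip when already present or too short) is Set.add over the length-filtered prefixes
theorem foldA_eq (pl : Int) (l : List String) (init : PySem.Set String) :
    l.foldl (fun s term =>
      if PySem.Set.contains s (PySem.Str.lower (PySem.Str.slice term none (some pl)))
         || decide (PySem.Str.len (PySem.Str.lower (PySem.Str.slice term none (some pl))) < pl) then s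
      else PySem.Set.add s (PySem.Str.lower (PySem.Str.slice term none (some pl)))) init
    = ((l.map (fun term => PySem.Str.lower (PySem.Str.slice term none (some pl)))).filter
        (fun p => decide (pl ≤ PySem.Str.len p))).foldl PySem.Set.add init := by
  induction l generalizing init with
  | nil => rfl
  | cons t ts ih =>
    simp only [List.foldl_cons, List.map_cons, List.filter_cons]
    by_cases hc : pl ≤ PySem.Str.len (PySem.Str.lower (PySem.Str.slice t none (some pl)))
    · have h1 : decide (PySem.Str.len (PySem.Str.lower (PySem.Str.slice t none (some pl))) < pl) = false :=
        decide_eq_false (by omega)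
      rw [if_pos (decide_eq_true hc), List.foldl_cons]
      by_cases hm : PySem.Set.contains init (PySem.Str.lower (PySem.Str.slice t none (some pl))) = true
      · rw [if_pos (by rw [hm, h1]; rfl), ih,
          PySem.Set.add_of_mem ((PySem.Set.contains_iff _ _).mp hm)]
      · rw [Bool.not_eq_true] at hm
        rw [if_neg (by rw [hm, h1]; exact Bool.false_ne_true), ih]
    · have h1 : decide (PySem.Str.len (PySem.Str.lower (PySem.Str.slice t none (some pl))) < pl) = true :=
        decide_eq_true (by omega)
      rw [if_pos (by rw [h1, Bool.or_true]), if_neg (by rw [decide_eq_false hc]; exact Bool.false_ne_true), ih]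

-- in a (≤)-sorted list every element is at most the last one
theorem le_getLast_of_pairwise_le (out : List String) (m a : String)
    (h : out.Pairwise (· ≤ ·)) (hm : out.getLast? = some m) (ha : a ∈ out) : a ≤ m := by
  induction out with
  | nil => cases ha
  | cons x xs ih =>
    rcases List.pairwise_cons.mp h with ⟨hx, hxs⟩
    cases xs with
    | nil =>
      simp only [List.getLast?_singleton, Option.some.injEq] at hm
      simp only [List.mem_singleton] at ha
      simp [ha, hm]
    | cons y ys =>
      rw [List.getLast?_cons_cons] at hm
      rcases List.mem_cons.mp ha with rfl | ha'
      · exact le_trans (hx m (List.mem_of_getLast? hm)) le_rfl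
      · exact ih hxs hm ha'

-- the adjacent-dedup fold: on a (≤)-sorted input it yields a strictly sorted list with the same members
theorem dedup_fold (l : List String) (out : List String)
    (hl : l.Pairwise (· ≤ ·)) (hout : out.Pairwise (· < ·))
    (hle : ∀ a ∈ out, ∀ b ∈ l, a ≤ b) :
    (l.foldl (fun out p => if out.getLast? = some p then out else out ++ [p]) out).Pairwise (· < ·) ∧
    ∀ x, x ∈ l.foldl (fun out p => if out.getLast? = some p then out else out ++ [p]) out ↔ x ∈ out ∨ x ∈ l := by
  induction l generalizing out with
  | nil => exact ⟨hout, fun x => by simp⟩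
  | cons p t ih =>
    rcases List.pairwise_cons.mp hl with ⟨hhead, htail⟩
    simp only [List.foldl_cons]
    by_cases h : out.getLast? = some p
    · have hp : p ∈ out := List.mem_of_getLast? h
      rw [if_pos h]
      obtain ⟨h1, h2⟩ := ih out htail hout
        (fun a ha b hb => hle a ha b (List.mem_cons_of_mem _ hb))
      refine ⟨h1, fun x => ?_⟩
      rw [h2 x, List.mem_cons]
      constructor
      · tauto
      · rintro (hx | rfl | hx) <;> tauto
    · rw [if_neg h]
      have hnp : p ∉ out := by
        intro hpin
        have hne : out ≠ [] := by rintro rfl; cases hpin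
        obtain ⟨m, hm⟩ := Option.isSome_iff_exists.mp (List.getLast?_isSome.mpr hne)
        have h1 : p ≤ m :=
          le_getLast_of_pairwise_le out m p (hout.imp le_of_lt) hm hpin
        have h2 : m ≤ p := hle m (List.mem_of_getLast? hm) p (List.mem_cons_self)
        exact h (by rw [hm, le_antisymm h2 h1])
      have hout' : (out ++ [p]).Pairwise (· < ·) := by
        rw [List.pairwise_append]
        refine ⟨hout, List.pairwise_singleton _ _, ?_⟩
        intro a ha b hb
        rw [List.mem_singleton] at hb
        subst hb
        exact lt_of_le_of_ne (hle a ha b (List.mem_cons_self)) (fun hab => hnp (hab ▸ ha))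
      have hle' : ∀ a ∈ out ++ [p], ∀ b ∈ t, a ≤ b := by
        intro a ha b hb
        rcases List.mem_append.mp ha with ha' | ha'
        · exact hle a ha' b (List.mem_cons_of_mem _ hb)
        · rw [List.mem_singleton] at ha'; subst ha'; exact hhead b hb
      obtain ⟨h1, h2⟩ := ih (out ++ [p]) htail hout' hle'
      refine ⟨h1, fun x => ?_⟩
      rw [h2 x]
      simp [List.mem_append, List.mem_cons]
      tauto

-- ===== VERDICT (by name: the statement is the Claim_ definition above) =====
theorem get_prefix_terms_spec : Claim_equal_get_prefix_terms := by
  intro search_terms prefix_length _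
  unfold Spec_get_prefix_terms
  show get_prefix_terms search_terms prefix_length = _
  simp only [get_prefix_terms, get_prefix_terms_alt]
  rw [foldA_eq]
  set L := ((search_terms.map (fun term => PySem.Str.lower (PySem.Str.slice term none (some prefix_length)))).filter
      (fun p => decide (prefix_length ≤ PySem.Str.len p))) with hL
  have hOf : L.foldl PySem.Set.add PySem.Set.empty = PySem.Set.ofList L :=
    (PySem.Set.ofList_eq_foldl L).symm
  rw [hOf]
  obtain ⟨hpair, hmem⟩ := dedup_fold (PySem.List.sorted L (fun x => x)) []
    (PySem.List.sorted_pairwise L (fun x => x)) (List.Pairwise.nil) (by intro a ha; cases ha)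
  apply PySem.List.sorted_eq_of_perm_of_pairwise_lt
  · apply (List.perm_ext_iff_of_nodup (hpair.imp ne_of_lt) (PySem.Set.nodup_ofList L)).mpr
    intro a
    rw [hmem a, PySem.Set.mem_ofList]
    simp [(PySem.List.sorted_perm L (fun x => x) false).mem_iff]
  · exact hpair
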